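-- pv_equiv track=rewrite | github.com/theara-y/battleships | ai.py | coord_path
-- ===== SOURCE A (Python) =====
-- def coord_path(coord1, coord2):
--     y1, x1 = coord1
--     y2, x2 = coord2
--     direction = 0
--     if y2 < 0 or x2 < 0:
--         direction = -1
--     elif y2 > 0 or x2 > 0:
--         direction = 1
--     path = []
--     for y in range(y1, y1 + y2 + direction, direction):
--         for x in range(x1, x1 + x2 + direction, direction):
--             path.append((y, x))
--     return path[:-1]
-- ===== SOURCE B (Python) =====
-- def coord_path(coord1, coord2):
--     y1, x1 = coord1
--     y2, x2 = coord2
--     if y2 < 0 or x2 < 0: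
--         d = -1
--     elif y2 > 0 or x2 > 0:
--         d = 1
--     else:
--         d = 0
--     ys = range(y1, y1 + y2 + d, d)
--     xs = range(x1, x1 + x2 + d, d)
--     nx = len(xs)
--     return [(ys[i // nx], xs[i % nx]) for i in range(len(ys) * nx - 1)]
-- ===== Notes on version B (the rewrite author's own statement) =====
-- stated objective: alternative
-- what changed: Replaces A's nested y/x loops with list accumulation followed by a [:-1] slice by a single flat comprehension over range(len(ys)*len(xs)-1) that recovers each pair by divmod index arithmetic, so the last element is never built.
import Mathlib
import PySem

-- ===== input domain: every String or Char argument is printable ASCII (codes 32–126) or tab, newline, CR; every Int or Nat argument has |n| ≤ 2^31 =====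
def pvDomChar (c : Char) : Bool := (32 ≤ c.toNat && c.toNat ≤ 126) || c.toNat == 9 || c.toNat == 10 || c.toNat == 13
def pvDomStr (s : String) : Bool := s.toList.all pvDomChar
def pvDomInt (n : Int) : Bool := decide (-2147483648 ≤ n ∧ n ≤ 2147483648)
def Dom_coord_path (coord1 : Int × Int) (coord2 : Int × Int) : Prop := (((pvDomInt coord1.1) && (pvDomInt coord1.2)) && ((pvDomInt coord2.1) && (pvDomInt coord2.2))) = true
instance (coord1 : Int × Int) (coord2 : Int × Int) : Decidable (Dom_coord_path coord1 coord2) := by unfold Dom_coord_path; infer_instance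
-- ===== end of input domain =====

-- B builds the path in one flat pass with divmod index arithmetic instead of A's nested loops plus a [:-1] slice (alternative decomposition, same cost).

-- ===== PORT A =====
def coord_path (coord1 : Int × Int) (coord2 : Int × Int) : List (Int × Int) :=
  let y1 := coord1.1; let x1 := coord1.2
  let y2 := coord2.1; let x2 := coord2.2
  let direction : Int := if y2 < 0 ∨ x2 < 0 then -1 else if y2 > 0 ∨ x2 > 0 then 1 else 0
  let path : List (Int × Int) :=
    (PySem.List.pyRange y1 (y1 + y2 + direction) direction).foldl
      (fun acc y =>
        (PySem.List.pyRange x1 (x1 + x2 + direction) direction).foldl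
          (fun acc2 x => acc2 ++ [(y, x)]) acc) []
  PySem.List.slice path none (some (-1))

-- ===== PORT B =====
def coord_path_alt (coord1 : Int × Int) (coord2 : Int × Int) : List (Int × Int) :=
  let y1 := coord1.1; let x1 := coord1.2
  let y2 := coord2.1; let x2 := coord2.2
  let d : Int := if y2 < 0 ∨ x2 < 0 then -1 else if y2 > 0 ∨ x2 > 0 then 1 else 0
  let ys := PySem.List.pyRange y1 (y1 + y2 + d) d
  let xs := PySem.List.pyRange x1 (x1 + x2 + d) d
  let nx : Int := xs.length
  (PySem.List.pyRange 0 ((ys.length : Int) * nx - 1) 1).map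
    (fun i => (PySem.List.pyGetD ys (PySem.Int.floordiv i nx) 0,
               PySem.List.pyGetD xs (PySem.Int.mod i nx) 0))

-- ===== PRECONDITION & SPEC =====
-- Pre_ excludes exactly coord2 = (0, 0), where both Pythons raise ValueError (range() with step 0).
def Pre_coord_path (coord1 : Int × Int) (coord2 : Int × Int) : Prop := ¬ (coord2.1 = 0 ∧ coord2.2 = 0)
instance (coord1 : Int × Int) (coord2 : Int × Int) : Decidable (Pre_coord_path coord1 coord2) := by unfold Pre_coord_path; infer_instance
def pvWitness_coord_path : (Int × Int) × (Int × Int) := ((1, 1), (2, 3))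

def Spec_coord_path (coord1 : Int × Int) (coord2 : Int × Int) (out : List (Int × Int)) : Prop := out = coord_path_alt coord1 coord2
instance (coord1 : Int × Int) (coord2 : Int × Int) (out : List (Int × Int)) : Decidable (Spec_coord_path coord1 coord2 out) := by unfold Spec_coord_path; infer_instance

-- ===== CLAIM (what is proved, stated in full; the proofs are below) =====
def Claim_equal_coord_path : Prop := ∀ (coord1 : Int × Int) (coord2 : Int × Int), Dom_coord_path coord1 coord2 → Pre_coord_path coord1 coord2 → Spec_coord_path coord1 coord2 (coord_path coord1 coord2)

-- ===== LEMMAS AND PROOFS =====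

-- core divmod enumeration fact, on the Nat side
theorem pv_range_divmod_flat (ys xs : List Int) :
    (List.range (ys.length * xs.length)).map
      (fun k => (ys.getD (k / xs.length) 0, xs.getD (k % xs.length) 0))
    = ys.flatMap (fun y => xs.map (fun x => (y, x))) := by
  induction ys with
  | nil => simp
  | cons y ys ih =>
    rcases Nat.eq_zero_or_pos xs.length with h0 | hpos
    · simp [List.length_eq_zero_iff.mp h0]
    · have hsplit : (y :: ys).length * xs.length = xs.length + ys.length * xs.length := by
        simp [Nat.succ_mul, Nat.add_comm]
      rw [hsplit, List.range_add, List.map_append, List.flatMap_cons]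
      congr 1
      · have hcong : ∀ k ∈ List.range xs.length,
            ((y :: ys).getD (k / xs.length) 0, xs.getD (k % xs.length) 0)
              = (y, xs.getD k 0) := by
          intro k hk
          have hk' := List.mem_range.mp hk
          simp [Nat.div_eq_of_lt hk', Nat.mod_eq_of_lt hk']
        rw [List.map_congr_left hcong]
        have hxs : xs = (List.range xs.length).map (fun k => xs.getD k 0) := by
          apply List.ext_getElem
          · simp
          · intro i h1 h2
            simp [List.getD_eq_getElem?_getD, List.getElem?_eq_getElem h1]
        conv_rhs => rw [hxs]
        simp [List.map_map, Function.comp]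
      · rw [List.map_map, ← ih]
        apply List.map_congr_left
        intro k _
        have h1 : (xs.length + k) / xs.length = k / xs.length + 1 :=
          Nat.add_div_left k hpos
        have h2 : (xs.length + k) % xs.length = k % xs.length :=
          Nat.add_mod_left _ _
        simp [Function.comp, h1, h2]

theorem pv_dropLast_map_range {α : Type} (n : Nat) (f : Nat → α) :
    ((List.range n).map f).dropLast = (List.range (n - 1)).map f := by
  cases n with
  | zero => simp
  | succ m => simp [List.range_succ]

-- B's flat pass over range(0, ny*nx - 1) is the dropLast of the full divmod enumeration
theorem pv_alt_eq_dropLast (ys xs : List Int) :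
    (PySem.List.pyRange 0 ((ys.length : Int) * (xs.length : Int) - 1) 1).map
      (fun i => (PySem.List.pyGetD ys (PySem.Int.floordiv i (xs.length : Int)) 0,
                 PySem.List.pyGetD xs (PySem.Int.mod i (xs.length : Int)) 0))
    = (ys.flatMap (fun y => xs.map (fun x => (y, x)))).dropLast := by
  rw [← pv_range_divmod_flat, pv_dropLast_map_range]
  rw [PySem.List.pyRange_one, List.map_map]
  have hN : ((ys.length : Int) * (xs.length : Int) - 1 - 0).toNat
      = ys.length * xs.length - 1 := by
    omega
  rw [hN]
  apply List.map_congr_left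
  intro k _
  simp only [Function.comp, zero_add, PySem.Int.floordiv_natCast, PySem.Int.mod_natCast,
        PySem.List.pyGetD_natCast]

-- A's nested append loops build the full cartesian path in row-major order
theorem pv_nested_foldl (ys xs : List Int) :
    ys.foldl (fun acc y => xs.foldl (fun acc2 x => acc2 ++ [(y, x)]) acc) []
      = ys.flatMap (fun y => xs.map (fun x => (y, x))) := by
  rw [PySem.List.foldl_congr_mem ys _ (fun acc y => acc ++ xs.map (fun x => (y, x))) []
      (by intro acc y _; rw [PySem.List.foldl_append_singleton_eq_map])]
  rw [PySem.List.foldl_append_eq_flatMap]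
  simp

-- ===== VERDICT (by name: the statement is the Claim_ definition above) =====
theorem coord_path_spec : Claim_equal_coord_path := by
  intro coord1 coord2 _ _
  unfold Spec_coord_path coord_path coord_path_alt
  rw [PySem.List.slice_to_neg_one, pv_nested_foldl]
  exact (pv_alt_eq_dropLast _ _).symm
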